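-- pv_equiv track=rewrite | github.com/smilejakdu/algorithm | sj/3weeks/모의고사.py | solution
-- ===== SOURCE A (Python) =====
-- def solution(answers):
--
--     supo_list    = [[1, 2, 3, 4, 5],
--                     [2, 1, 2, 3, 2, 4, 2, 5],
--                     [3, 3, 1, 1, 2, 2, 4, 4, 5, 5]]
--
--     answer_list  = [0 , 0 , 0]
--
--     for answer in range(len(answers)):
--         if supo_list[0][answer % len(supo_list[0])] == answers[answer]:
--             answer_list[0] += 1
--
--         if supo_list[1][answer % len(supo_list[1])] == answers[answer]:
--             answer_list[1] += 1
--
--         if supo_list[2][answer % len(supo_list[2])] == answers[answer]: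
--             answer_list[2] += 1
--
--     result_list = [answer+1 for answer in range(0 , len(answer_list)) if max(answer_list) == answer_list[answer]]
--
--     return result_list
-- ===== SOURCE B (Python) =====
-- def solution(answers):
--     patterns = [[1, 2, 3, 4, 5],
--                 [2, 1, 2, 3, 2, 4, 2, 5],
--                 [3, 3, 1, 1, 2, 2, 4, 4, 5, 5]]
--     # Histogram pass: all three pattern periods divide 40, so an answer's fate
--     # against every pattern depends only on (index mod 40, value).
--     counts = {}
--     for i, a in enumerate(answers):
--         key = (i % 40, a)
--         counts[key] = counts.get(key, 0) + 1
--     scores = [sum(c for (r, v), c in counts.items() if p[r % len(p)] == v)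
--               for p in patterns]
--     best = max(scores)
--     return [i + 1 for i, s in enumerate(scores) if s == best]
-- ===== Notes on version B (the rewrite author's own statement) =====
-- stated objective: alternative
-- what changed: Replaced A's per-element scoring loop (each index compared against each of the three cyclic patterns) with a residue-class histogram: one pass builds a dict counting occurrences of (index mod 40, answer) -- 40 being the common period of the three patterns -- and each score is then read off by aggregating the histogram's entries against that pattern, so no per-element pattern comparison remains.
import Mathlib
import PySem

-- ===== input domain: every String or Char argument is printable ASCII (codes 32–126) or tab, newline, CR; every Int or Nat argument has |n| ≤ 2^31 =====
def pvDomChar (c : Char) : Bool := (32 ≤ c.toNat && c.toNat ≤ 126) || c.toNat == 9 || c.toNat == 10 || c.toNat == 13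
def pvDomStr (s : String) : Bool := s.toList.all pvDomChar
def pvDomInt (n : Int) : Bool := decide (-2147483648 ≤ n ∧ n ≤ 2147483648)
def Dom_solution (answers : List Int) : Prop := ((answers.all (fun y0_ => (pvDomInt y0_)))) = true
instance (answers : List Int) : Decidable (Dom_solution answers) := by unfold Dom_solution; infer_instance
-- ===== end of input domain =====

-- B replaces A's per-element scoring against the three cyclic patterns by a residue-class
-- histogram: one pass counts (index mod 40, answer) pairs (40 = common period of the three
-- patterns), then each score is aggregated from the histogram; same O(n), different algorithm.


-- ===== PORT A =====
def supoA0 : List Int := [1, 2, 3, 4, 5]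
def supoA1 : List Int := [2, 1, 2, 3, 2, 4, 2, 5]
def supoA2 : List Int := [3, 3, 1, 1, 2, 2, 4, 4, 5, 5]

-- one iteration of A's loop body; answer_list is the triple (al.1, al.2.1, al.2.2).
-- pyGetD with default 0 is exact here: every index taken is in range (0 ≤ i < len).
def stepA (answers : List Int) (al : Int × Int × Int) (i : Int) : Int × Int × Int :=
  let a := PySem.List.pyGetD answers i 0
  let al := if PySem.List.pyGetD supoA0 (PySem.Int.mod i (supoA0.length : Int)) 0 = a then
              (al.1 + 1, al.2.1, al.2.2) else al
  let al := if PySem.List.pyGetD supoA1 (PySem.Int.mod i (supoA1.length : Int)) 0 = a then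
              (al.1, al.2.1 + 1, al.2.2) else al
  if PySem.List.pyGetD supoA2 (PySem.Int.mod i (supoA2.length : Int)) 0 = a then
    (al.1, al.2.1, al.2.2 + 1) else al

def solution (answers : List Int) : List Int :=
  let al := (PySem.List.pyRange 0 (answers.length : Int) 1).foldl (stepA answers) (0, 0, 0)
  let answer_list : List Int := [al.1, al.2.1, al.2.2]
  -- max(answer_list): the list has 3 elements, so max? is some; getD 0 is unreachable
  let m := ((PySem.List.max? answer_list (fun x => x)).getD 0)
  (PySem.List.pyRange 0 (answer_list.length : Int) 1).filterMap
    (fun i => if m = PySem.List.pyGetD answer_list i 0 then some (i + 1) else none)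

-- ===== PORT B =====
def patternsB : List (List Int) := [[1, 2, 3, 4, 5], [2, 1, 2, 3, 2, 4, 2, 5], [3, 3, 1, 1, 2, 2, 4, 4, 5, 5]]

-- the histogram loop: counts[(i % 40, a)] = counts.get((i % 40, a), 0) + 1 over enumerate(answers)
def countsB (answers : List Int) : PySem.Dict (Int × Int) Int :=
  (PySem.List.enumerate answers 0).foldl
    (fun d ia => d.insert (PySem.Int.mod ia.1 40, ia.2)
                   (d.getD (PySem.Int.mod ia.1 40, ia.2) 0 + 1))
    PySem.Dict.empty

-- sum(c for (r, v), c in counts.items() if p[r % len(p)] == v); index r % len(p) in range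
def scoreB (p : List Int) (d : PySem.Dict (Int × Int) Int) : Int :=
  d.items.foldl
    (fun acc kv =>
      acc + (if PySem.List.pyGetD p (PySem.Int.mod kv.1.1 (p.length : Int)) 0 = kv.1.2
             then kv.2 else 0)) 0

def solution_alt (answers : List Int) : List Int :=
  let counts := countsB answers
  let scores := patternsB.map (fun p => scoreB p counts)
  -- max(scores): scores has 3 elements, so max? is some; getD 0 is unreachable
  let best := (PySem.List.max? scores (fun x => x)).getD 0
  (PySem.List.enumerate scores 0).filterMap
    (fun isp => if isp.2 = best then some (isp.1 + 1) else none)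

-- ===== PRECONDITION & SPEC =====
def Spec_solution (answers : List Int) (out : List Int) : Prop := out = solution_alt answers
instance (answers : List Int) (out : List Int) : Decidable (Spec_solution answers out) := by unfold Spec_solution; infer_instance

-- ===== CLAIM (what is proved, stated in full; the proofs are below) =====
def Claim_equal_solution : Prop := ∀ (answers : List Int), Dom_solution answers → Spec_solution answers (solution answers)

-- ===== LEMMAS AND PROOFS =====

-- the keys fed to B's histogram, in order
def ksOf (answers : List Int) : List (Int × Int) :=
  (PySem.List.enumerate answers 0).map (fun ia => (PySem.Int.mod ia.1 40, ia.2))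

lemma countsB_eq_counter (answers : List Int) :
    countsB answers = PySem.Dict.counter (ksOf answers) := by
  rw [← PySem.Dict.foldl_insert_getD_add_one_eq_counter, ksOf, List.foldl_map]
  rfl

-- Σ over a Nodup key list of [Q k ∧ k = x] is the indicator of x ∈ S ∧ Q x
lemma onehot (Q : Int × Int → Prop) [DecidablePred Q] (x : Int × Int) :
    ∀ (S : List (Int × Int)), S.Nodup →
      (S.map (fun k => if Q k ∧ k = x then (1 : Int) else 0)).sum
        = if x ∈ S ∧ Q x then 1 else 0 := by
  intro S
  induction S with
  | nil => intro _; simp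
  | cons y S ih =>
    intro hnd
    rcases List.nodup_cons.1 hnd with ⟨hy, hS⟩
    simp only [List.map_cons, List.sum_cons, ih hS]
    by_cases hx : y = x
    · subst hx
      by_cases hQ : Q y <;> simp [hQ, hy]
    · have hmem : x ∈ y :: S ↔ x ∈ S := by
        constructor
        · intro h; rcases List.mem_cons.1 h with h | h
          · exact absurd h.symm hx
          · exact h
        · exact fun h => List.mem_cons_of_mem _ h
      by_cases hQy : Q y <;> simp [hQy, hx, hmem]

-- Σ over a Nodup key set of [Q k]·(count of k in ks) = Σ over ks of [x ∈ S ∧ Q x]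
lemma sum_hist (Q : Int × Int → Prop) [DecidablePred Q]
    (S : List (Int × Int)) (hS : S.Nodup) :
    ∀ ks : List (Int × Int),
      (S.map (fun k => if Q k then (ks.count k : Int) else 0)).sum
        = (ks.map (fun x => if x ∈ S ∧ Q x then (1 : Int) else 0)).sum := by
  intro ks
  induction ks with
  | nil => simp
  | cons x xs ih =>
    have hterm : ∀ k : Int × Int,
        (if Q k then (((x :: xs).count k : Nat) : Int) else 0)
          = (if Q k then ((xs.count k : Nat) : Int) else 0)
            + (if Q k ∧ k = x then (1 : Int) else 0) := by
      intro k
      by_cases hk : k = x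
      · subst hk
        by_cases hQ : Q k <;> simp [hQ]
      · have hxk : ¬ x = k := fun h => hk h.symm
        simp [hk, hxk]
    calc (S.map (fun k => if Q k then (((x :: xs).count k : Nat) : Int) else 0)).sum
        = (S.map (fun k => (if Q k then ((xs.count k : Nat) : Int) else 0)
            + (if Q k ∧ k = x then (1 : Int) else 0))).sum := by
          exact congrArg List.sum (List.map_congr_left (fun k _ => hterm k))
      _ = (S.map (fun k => if Q k then ((xs.count k : Nat) : Int) else 0)).sum
            + (S.map (fun k => if Q k ∧ k = x then (1 : Int) else 0)).sum := by
          rw [← List.sum_map_add]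
      _ = (xs.map (fun y => if y ∈ S ∧ Q y then (1 : Int) else 0)).sum
            + (if x ∈ S ∧ Q x then 1 else 0) := by
          rw [ih, onehot Q x S hS]
      _ = ((x :: xs).map (fun y => if y ∈ S ∧ Q y then (1 : Int) else 0)).sum := by
          simp [add_comm]

-- the core: B's aggregated score over the histogram = per-element indicator sum
lemma scoreB_eq_sum (answers : List Int) (p : List Int)
    (hd : ((p.length : Int)) ∣ 40) (hp : 0 < (p.length : Int)) :
    scoreB p (countsB answers)
      = ((PySem.List.enumerate answers 0).map
          (fun ia => if PySem.List.pyGetD p (PySem.Int.mod ia.1 (p.length : Int)) 0 = ia.2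
                     then (1 : Int) else 0)).sum := by
  have hmodmod : ∀ i : Int,
      PySem.Int.mod (PySem.Int.mod i 40) (p.length : Int) = PySem.Int.mod i (p.length : Int) := by
    intro i
    rw [PySem.Int.mod_eq_emod_of_pos (by norm_num : (0:Int) < 40),
        PySem.Int.mod_eq_emod_of_pos hp, PySem.Int.mod_eq_emod_of_pos hp,
        Int.emod_emod_of_dvd _ hd]
  set Q : Int × Int → Prop :=
    fun k => PySem.List.pyGetD p (PySem.Int.mod k.1 (p.length : Int)) 0 = k.2 with hQ
  have h1 : scoreB p (countsB answers)
      = ((countsB answers).items.map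
          (fun kv => if Q kv.1 then kv.2 else 0)).sum := by
    rw [scoreB, PySem.List.foldl_add]
    simp [hQ]
  rw [h1, countsB_eq_counter, PySem.Dict.items_counter, List.map_map]
  rw [show ((fun kv : (Int × Int) × Int => if Q kv.1 then kv.2 else 0)
        ∘ fun k => (k, (((ksOf answers).count k : Nat) : Int)))
      = fun k => if Q k then (((ksOf answers).count k : Nat) : Int) else 0
    from funext (fun k => rfl)]
  rw [sum_hist Q _ (PySem.Set.nodup_ofList _) (ksOf answers)]
  have hmem : ∀ x ∈ ksOf answers, x ∈ PySem.Set.ofList (ksOf answers) := by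
    intro x hx; exact (PySem.Set.mem_ofList _ _).2 hx
  have h3 : ((ksOf answers).map
        (fun x => if x ∈ PySem.Set.ofList (ksOf answers) ∧ Q x then (1 : Int) else 0)).sum
      = ((ksOf answers).map (fun x => if Q x then (1 : Int) else 0)).sum := by
    refine congrArg List.sum (List.map_congr_left ?_)
    intro x hx
    simp [hmem x hx]
  rw [h3, ksOf, List.map_map]
  refine congrArg List.sum (List.map_congr_left ?_)
  intro ia _
  simp only [Function.comp_apply, hQ, hmodmod]

-- ===== A-side helpers: read A's loop off enumerate pairs and split it into three sums =====

def stepE (al : Int × Int × Int) (ia : Int × Int) : Int × Int × Int :=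
  let a := ia.2
  let al := if PySem.List.pyGetD supoA0 (PySem.Int.mod ia.1 (supoA0.length : Int)) 0 = a then
              (al.1 + 1, al.2.1, al.2.2) else al
  let al := if PySem.List.pyGetD supoA1 (PySem.Int.mod ia.1 (supoA1.length : Int)) 0 = a then
              (al.1, al.2.1 + 1, al.2.2) else al
  if PySem.List.pyGetD supoA2 (PySem.Int.mod ia.1 (supoA2.length : Int)) 0 = a then
    (al.1, al.2.1, al.2.2 + 1) else al

def bump (p : List Int) (acc : Int) (ia : Int × Int) : Int :=
  acc + (if PySem.List.pyGetD p (PySem.Int.mod ia.1 (p.length : Int)) 0 = ia.2 then 1 else 0)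

lemma stepE_eq (al : Int × Int × Int) (ia : Int × Int) :
    stepE al ia = (bump supoA0 al.1 ia, bump supoA1 al.2.1 ia, bump supoA2 al.2.2 ia) := by
  unfold stepE bump
  split_ifs <;> simp [*]

lemma combined_fold (l : List (Int × Int)) :
    ∀ (c0 c1 c2 : Int),
      l.foldl stepE (c0, c1, c2)
      = (l.foldl (bump supoA0) c0, l.foldl (bump supoA1) c1, l.foldl (bump supoA2) c2) := by
  induction l with
  | nil => intro c0 c1 c2; rfl
  | cons ia l ih =>
    intro c0 c1 c2
    simp only [List.foldl_cons, stepE_eq]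
    exact ih _ _ _

lemma mem_enum_char (xs : List Int) :
    ∀ (s : Int) (p : Int × Int), p ∈ PySem.List.enumerate xs s →
      ∃ k : Nat, k < xs.length ∧ p.1 = s + k ∧ p.2 = xs[k]! := by
  induction xs with
  | nil => intro s p hp; simp [PySem.List.enumerate_nil] at hp
  | cons x xs ih =>
    intro s p hp
    rw [PySem.List.enumerate_cons] at hp
    rcases List.mem_cons.1 hp with h | h
    · exact ⟨0, by simp [h]⟩
    · obtain ⟨k, hk, h1, h2⟩ := ih (s + 1) p h
      exact ⟨k + 1, by simpa using hk, by omega, by simp [h2]⟩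

lemma pyGetD_of_mem_enumerate (xs : List Int) (d : Int) (p : Int × Int)
    (hp : p ∈ PySem.List.enumerate xs 0) : PySem.List.pyGetD xs p.1 d = p.2 := by
  obtain ⟨k, hk, h1, h2⟩ := mem_enum_char xs 0 p hp
  rw [h1, h2]
  simp only [zero_add]
  rw [PySem.List.pyGetD_eq_getElem xs d (by positivity) (by exact_mod_cast hk)]
  simp [List.getElem!_eq_getElem?_getD, List.getElem?_eq_getElem hk]

lemma loop_eq_sums (answers : List Int) :
    (PySem.List.pyRange 0 (answers.length : Int) 1).foldl (stepA answers) (0, 0, 0)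
    = (((PySem.List.enumerate answers 0).map
          (fun ia => if PySem.List.pyGetD supoA0 (PySem.Int.mod ia.1 (supoA0.length : Int)) 0 = ia.2 then (1:Int) else 0)).sum,
       ((PySem.List.enumerate answers 0).map
          (fun ia => if PySem.List.pyGetD supoA1 (PySem.Int.mod ia.1 (supoA1.length : Int)) 0 = ia.2 then (1:Int) else 0)).sum,
       ((PySem.List.enumerate answers 0).map
          (fun ia => if PySem.List.pyGetD supoA2 (PySem.Int.mod ia.1 (supoA2.length : Int)) 0 = ia.2 then (1:Int) else 0)).sum) := by
  have hr : PySem.List.pyRange 0 (answers.length : Int) 1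
      = (PySem.List.enumerate answers 0).map (fun x => x.1) := by
    rw [PySem.List.map_fst_enumerate]; norm_num
  rw [hr, List.foldl_map]
  have hc : (PySem.List.enumerate answers 0).foldl (fun al p => stepA answers al p.1) (0, 0, 0)
      = (PySem.List.enumerate answers 0).foldl stepE ((0 : Int), (0 : Int), (0 : Int)) := by
    apply PySem.List.foldl_congr_mem
    intro acc p hp
    unfold stepA stepE
    rw [pyGetD_of_mem_enumerate answers 0 p hp]
  rw [hc, combined_fold]
  unfold bump
  rw [PySem.List.foldl_add, PySem.List.foldl_add, PySem.List.foldl_add]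
  simp

-- A's result list from the three scores equals B's (enumerate-based) result list
lemma final3 (s0 s1 s2 : Int) :
    List.filterMap
      (fun i => if ((PySem.List.max? [s0, s1, s2] (fun x => x)).getD 0)
                   = PySem.List.pyGetD [s0, s1, s2] i 0 then some (i + 1) else none)
      (PySem.List.pyRange 0 (([s0, s1, s2] : List Int).length : Int))
    = List.filterMap
      (fun p => if p.2 = ((PySem.List.max? [s0, s1, s2] (fun x => x)).getD 0) then some (p.1 + 1) else none)
      (PySem.List.enumerate [s0, s1, s2]) := by
  generalize ((PySem.List.max? [s0, s1, s2] (fun x => x)).getD 0) = m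
  have hr : PySem.List.pyRange 0 (([s0, s1, s2] : List Int).length : Int) = [0, 1, 2] := by
    simp only [List.length_cons, List.length_nil]
    decide
  rw [hr]
  simp only [List.filterMap, PySem.List.enumerate_cons, PySem.List.enumerate_nil]
  norm_num [PySem.List.pyGetD, PySem.List.pyGet?, PySem.List.pyIdx?]
  by_cases h0 : s0 = m <;> by_cases h1 : s1 = m <;> by_cases h2 : s2 = m <;>
    simp [h0, h1, h2, eq_comm]

-- ===== VERDICT (by name: the statement is the Claim_ definition above) =====
theorem solution_spec : Claim_equal_solution := by
  intro answers _
  have hA : (PySem.List.pyRange 0 (answers.length : Int) 1).foldl (stepA answers) (0, 0, 0)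
      = (scoreB [1, 2, 3, 4, 5] (countsB answers),
         scoreB [2, 1, 2, 3, 2, 4, 2, 5] (countsB answers),
         scoreB [3, 3, 1, 1, 2, 2, 4, 4, 5, 5] (countsB answers)) := by
    rw [loop_eq_sums]
    simp only [supoA0, supoA1, supoA2]
    refine congrArg₂ Prod.mk ?_ (congrArg₂ Prod.mk ?_ ?_)
    · exact (scoreB_eq_sum answers [1, 2, 3, 4, 5] (by norm_num) (by norm_num)).symm
    · exact (scoreB_eq_sum answers [2, 1, 2, 3, 2, 4, 2, 5] (by norm_num) (by norm_num)).symm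
    · exact (scoreB_eq_sum answers [3, 3, 1, 1, 2, 2, 4, 4, 5, 5] (by norm_num) (by norm_num)).symm
  unfold Spec_solution solution solution_alt
  simp only [patternsB, List.map]
  rw [hA]
  exact final3 _ _ _
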